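-- pv_equiv track=rewrite | github.com/BiggieFudge/Second-year | Algo/AlgoNo.2/main.py | que1
-- ===== SOURCE A (Python) =====
-- def que1(T,P):
--     flag =0
--     arr=[0] * len(T)
--     brr=[0] * len(P)
--     for i in range(len(T)):
--         flag = 0
--         for j in range(len(P)):
--             if brr[j]==0 and T[i] == P[j]:
--                 flag = 1
--                 arr[i] = 1
--                 brr[j] = 1
--         if flag ==0:
--             for j in range(len(P)):
--                 brr[j]= 0
--         elif 0 not in brr:
--             return 1
--
--     return 0
-- ===== SOURCE B (Python) =====
-- def que1(T, P):
--     targets = set(P)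
--     k = len(targets)
--     last = {}
--     start = 0
--     i = 0
--     for x in T:
--         if x in targets and last.get(x, -1) < start:
--             if i - start + 1 == k:
--                 return 1
--         else:
--             start = i + 1
--         last[x] = i
--         i += 1
--     return 0
-- ===== Notes on version B (the rewrite author's own statement) =====
-- stated objective: faster
-- what changed: Replaces A's per-element inner scan of P with its 0/1 marker array and explicit reset loop by a single pass keeping a last-occurrence-index dictionary and a run-start pointer: validity of the current run is the position test last[x] < start, progress is the arithmetic run length i - start + 1 compared to the distinct-value count of P, and a reset is just moving the pointer (nothing is rescanned or cleared).
import Mathlib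
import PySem

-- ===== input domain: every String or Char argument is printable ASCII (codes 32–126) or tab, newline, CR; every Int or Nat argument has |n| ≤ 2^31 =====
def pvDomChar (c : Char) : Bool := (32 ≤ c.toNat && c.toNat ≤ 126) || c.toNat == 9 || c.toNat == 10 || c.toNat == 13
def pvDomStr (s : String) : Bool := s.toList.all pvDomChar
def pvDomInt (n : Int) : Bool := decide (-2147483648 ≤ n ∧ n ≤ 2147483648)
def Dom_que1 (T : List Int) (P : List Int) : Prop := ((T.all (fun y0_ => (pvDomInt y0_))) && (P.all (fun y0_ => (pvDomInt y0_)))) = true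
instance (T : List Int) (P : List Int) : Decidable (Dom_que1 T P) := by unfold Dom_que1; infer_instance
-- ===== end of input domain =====

-- B drops A's marker array and reset loop for a last-occurrence-index dictionary plus a
-- run-start pointer: one pass over T, run validity is last[x] < start, success when the run
-- length i - start + 1 reaches the distinct-value count of P; asymptotically faster.
-- A's local list `arr` is written but never read; the port omits it.

-- ===== PORT A =====
-- the inner 'for j in range(len(P))' loop: walks P and brr in lockstep, returning
-- (flag, updated brr); flag is the OR of the branch condition over all j.
def que1Inner (x : Int) : List Int → List Int → Bool × List Int
  | p :: ps, b :: bs =>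
      let r := que1Inner x ps bs
      if b = 0 ∧ x = p then (true, 1 :: r.2) else (r.1, b :: r.2)
  | _, bs => (false, bs)

-- the outer 'for i in range(len(T))' loop with state brr
def que1Outer (P : List Int) : List Int → List Int → Int
  | [], _ => 0
  | x :: ts, brr =>
      let r := que1Inner x P brr
      if r.1 = false then que1Outer P ts (List.replicate P.length 0)
      else if (0 : Int) ∈ r.2 then que1Outer P ts r.2
      else 1

def que1 (T : List Int) (P : List Int) : Int :=
  que1Outer P T (List.replicate P.length 0)

-- ===== PORT B =====
-- the 'for x in T' loop with state (last, start, i)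
def que1AltGo (targets : PySem.Set Int) (k : Int) :
    List Int → PySem.Dict Int Int → Int → Int → Int
  | [], _, _, _ => 0
  | x :: rest, last, start, i =>
      if PySem.Set.contains targets x = true ∧ PySem.Dict.getD last x (-1) < start then
        if i - start + 1 = k then 1
        else que1AltGo targets k rest (last.insert x i) start (i + 1)
      else que1AltGo targets k rest (last.insert x i) (i + 1) (i + 1)

def que1_alt (T : List Int) (P : List Int) : Int :=
  let targets := PySem.Set.ofList P
  que1AltGo targets (targets.length : Int) T PySem.Dict.empty 0 0

-- ===== PRECONDITION & SPEC =====
def Spec_que1 (T : List Int) (P : List Int) (out : Int) : Prop := out = que1_alt T P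
instance (T : List Int) (P : List Int) (out : Int) : Decidable (Spec_que1 T P out) := by unfold Spec_que1; infer_instance

-- ===== CLAIM (what is proved, stated in full; the proofs are below) =====
def Claim_equal_que1 : Prop := ∀ (T : List Int) (P : List Int), Dom_que1 T P → Spec_que1 T P (que1 T P)

-- ===== LEMMAS AND PROOFS =====

-- A's brr is always the 0/1 marking of P by the set of values matched since the last reset.
def pvMark (seen : List Int) (P : List Int) : List Int :=
  P.map (fun p => if p ∈ seen then (1 : Int) else 0)

theorem pvMark_nil (P : List Int) : pvMark [] P = List.replicate P.length 0 := by
  simp [pvMark]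

theorem que1Inner_mark (x : Int) (seen P : List Int) :
    que1Inner x P (pvMark seen P) =
      (decide (x ∈ P ∧ x ∉ seen), pvMark (x :: seen) P) := by
  induction P with
  | nil => simp [que1Inner, pvMark]
  | cons p ps ih =>
    simp only [pvMark, List.map_cons] at ih ⊢
    by_cases hps : p ∈ seen <;> by_cases hxp : x = p <;>
      simp [que1Inner, ih, hps, hxp] <;>
      try simp_all <;>
      try tauto

theorem zero_not_mem_mark (seen P : List Int) :
    ((0 : Int) ∉ pvMark seen P) ↔ ∀ p ∈ P, p ∈ seen := by
  simp [pvMark]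

theorem length_eq_iff_cover {seen targets : List Int}
    (hnd : seen.Nodup) (hTnd : targets.Nodup) (hsub : seen ⊆ targets) :
    seen.length = targets.length ↔ ∀ p ∈ targets, p ∈ seen := by
  constructor
  · intro hlen p hp
    have hperm : List.Perm seen targets :=
      List.Subperm.perm_of_length_le (List.subperm_of_subset hnd hsub) (le_of_eq hlen.symm)
    exact hperm.mem_iff.mpr hp
  · intro h
    have : List.Perm targets seen :=
      List.Subperm.perm_of_length_le (List.subperm_of_subset hTnd h)
        (List.Subperm.length_le (List.subperm_of_subset hnd hsub))
    exact this.length_eq.symm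

-- The bridge: A's seen-set/marker state corresponds to B's (last, start, i) state via
--   |seen| = i - start,  x ∈ seen ↔ start ≤ last[x],  and all stored indices are < i.
theorem que1_loop_eq (P : List Int) (T : List Int) (seen : List Int)
    (last : PySem.Dict Int Int) (start i : Int)
    (hnd : seen.Nodup) (hsub : ∀ y ∈ seen, y ∈ P)
    (hlen : (seen.length : Int) = i - start)
    (hmem : ∀ y, (start ≤ PySem.Dict.getD last y (-1)) ↔ y ∈ seen)
    (hlt : ∀ y, PySem.Dict.getD last y (-1) < i) :
    que1Outer P T (pvMark seen P) =
      que1AltGo (PySem.Set.ofList P) ((PySem.Set.ofList P).length : Int) T last start i := by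
  induction T generalizing seen last start i with
  | nil => rfl
  | cons x ts ih =>
    rw [que1Outer, que1AltGo, que1Inner_mark]
    dsimp only
    by_cases hflag : x ∈ P ∧ x ∉ seen
    · have hdec : decide (x ∈ P ∧ x ∉ seen) = true := by simp [hflag.1, hflag.2]
      have hcond : (PySem.Set.contains (PySem.Set.ofList P) x = true ∧
          PySem.Dict.getD last x (-1) < start) := by
        refine ⟨?_, ?_⟩
        · rw [PySem.Set.contains_iff, PySem.Set.mem_ofList]; exact hflag.1
        · by_contra h
          exact hflag.2 ((hmem x).mp (le_of_not_gt h))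
      have hndx : (seen ++ [x]).Nodup := by
        refine hnd.append (List.nodup_singleton x) ?_
        intro a ha hax
        rw [List.mem_singleton] at hax
        exact hflag.2 (hax ▸ ha)
      have hsubx : ∀ y ∈ seen ++ [x], y ∈ PySem.Set.ofList P := by
        intro y hy
        rw [PySem.Set.mem_ofList]
        rcases List.mem_append.mp hy with h | h
        · exact hsub y h
        · rw [List.mem_singleton] at h; exact h ▸ hflag.1
      have hmemx : ∀ y, y ∈ x :: seen ↔ y ∈ seen ++ [x] := by
        intro y; simp [or_comm]
      have hlenx : ((seen ++ [x]).length : Int) = i - start + 1 := by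
        simp only [List.length_append, List.length_cons, List.length_nil]
        push_cast; omega
      -- coverage after adding x ⟺ the run length reaches the distinct count of P
      have hcover : ((0:Int) ∉ pvMark (x :: seen) P) ↔
          i - start + 1 = ((PySem.Set.ofList P).length : Int) := by
        rw [zero_not_mem_mark]
        have hle := length_eq_iff_cover hndx (PySem.Set.nodup_ofList P) hsubx
        constructor
        · intro h
          have hN : (seen ++ [x]).length = (PySem.Set.ofList P).length :=
            hle.mpr (fun p hp => (hmemx p).mp (h p ((PySem.Set.mem_ofList P p).mp hp)))
          rw [← hlenx]; exact_mod_cast hN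
        · intro h p hp
          have hN : (seen ++ [x]).length = (PySem.Set.ofList P).length := by
            have hZ : ((seen ++ [x]).length : Int) = ((PySem.Set.ofList P).length : Int) := by
              rw [hlenx, h]
            exact_mod_cast hZ
          exact (hmemx p).mpr ((hle.mp hN) p ((PySem.Set.mem_ofList P p).mpr hp))
      rw [hdec, if_neg (by simp), if_pos hcond]
      by_cases hz : (0 : Int) ∈ pvMark (x :: seen) P
      · have hne : ¬ i - start + 1 = ((PySem.Set.ofList P).length : Int) :=
          fun h => (hcover.mpr h) hz
        rw [if_pos hz, if_neg hne]
        have hrw : pvMark (x :: seen) P = pvMark (seen ++ [x]) P := by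
          unfold pvMark
          exact List.map_congr_left (fun p _ => by simp [hmemx p])
        have hlen' : (((seen ++ [x]).length : Int)) = (i + 1) - start := by
          simp only [List.length_append, List.length_cons, List.length_nil]
          push_cast; omega
        have hmem' : ∀ y, (start ≤ PySem.Dict.getD (last.insert x i) y (-1)) ↔
            y ∈ seen ++ [x] := by
          intro y
          rw [PySem.Dict.getD_insert]
          by_cases hyx : y = x
          · subst hyx; simp; omega
          · simp [hyx, hmem y]
        have hlt' : ∀ y, PySem.Dict.getD (last.insert x i) y (-1) < i + 1 := by
          intro y
          rw [PySem.Dict.getD_insert]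
          by_cases hyx : y = x
          · simp [hyx]
          · simp only [hyx, if_false]
            have := hlt y; omega
        rw [hrw]
        exact ih (seen ++ [x]) (last.insert x i) start (i + 1) hndx
          (fun y hy => (PySem.Set.mem_ofList P y).mp (hsubx y hy)) hlen' hmem' hlt'
      · rw [if_neg hz, if_pos (hcover.mp hz)]
    · have hdec : decide (x ∈ P ∧ x ∉ seen) = false := by
        simp only [decide_eq_false_iff_not]; exact hflag
      have hc2 : ¬ (PySem.Set.contains (PySem.Set.ofList P) x = true ∧
          PySem.Dict.getD last x (-1) < start) := by
        rintro ⟨h1, h2⟩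
        rw [PySem.Set.contains_iff, PySem.Set.mem_ofList] at h1
        exact hflag ⟨h1, fun hs => absurd ((hmem x).mpr hs) (not_le.mpr h2)⟩
      rw [hdec, if_pos rfl, if_neg hc2, ← pvMark_nil]
      have hmem' : ∀ y, ((i + 1) ≤ PySem.Dict.getD (last.insert x i) y (-1)) ↔
          y ∈ ([] : List Int) := by
        intro y
        rw [PySem.Dict.getD_insert]
        by_cases hyx : y = x
        · subst hyx; simp
        · simp only [hyx, if_false, List.not_mem_nil, iff_false]
          have := hlt y; omega
      have hlt' : ∀ y, PySem.Dict.getD (last.insert x i) y (-1) < i + 1 := by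
        intro y
        rw [PySem.Dict.getD_insert]
        by_cases hyx : y = x
        · simp [hyx]
        · simp only [hyx, if_false]
          have := hlt y; omega
      exact ih [] (last.insert x i) (i + 1) (i + 1) (by simp) (by simp) (by simp) hmem' hlt'

-- ===== VERDICT (by name: the statement is the Claim_ definition above) =====
theorem que1_spec : Claim_equal_que1 := by
  intro T P _
  unfold Spec_que1 que1 que1_alt
  rw [← pvMark_nil]
  exact que1_loop_eq P T [] PySem.Dict.empty 0 0 (by simp) (by simp) (by simp)
    (fun y => by simp [PySem.Dict.getD_empty]) (fun y => by simp [PySem.Dict.getD_empty])
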